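-- pv_equiv track=rewrite | github.com/josephneumann/unkani | app/utils/demographics.py | validate_contact_type
-- ===== SOURCE A (Python) =====
-- def validate_contact_type(type):
--     type_dict = {"HOME": frozenset(["H", "HOME", "HOME PHONE", "HOUSE", "HOUSE PHONE", "LAND LINE"]),
--                  "MOBILE": frozenset(["C", "CELL", "MOBILE", "M", "CELL PHONE", "MOBILE PHONE"]),
--                  "WORK": frozenset(["W", "WORK", "WORK PHONE", "B", "BUSINESS", "BUSINESS PHONE"]),
--                  "TEMP": frozenset(["T", "TEMP", "TEMPORARY"]),
--                  }
--     if not type: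
--         raise ValueError(
--             "No contact type provided. A value in the allowed set must be provided.")
--
--     type = str(type).upper().strip()
--     n_type = None
--
--     for key in type_dict:
--         if type in type_dict[key]:
--             n_type = key
--     if not n_type:
--         raise ValueError("Contact type was not in the allowed set of values.")
--     return n_type
-- ===== SOURCE B (Python) =====
-- _ALIAS_TO_TYPE = {}
-- for _cat, _aliases in [("HOME", ["H", "HOME", "HOME PHONE", "HOUSE", "HOUSE PHONE", "LAND LINE"]),
--                        ("MOBILE", ["C", "CELL", "MOBILE", "M", "CELL PHONE", "MOBILE PHONE"]),
--                        ("WORK", ["W", "WORK", "WORK PHONE", "B", "BUSINESS", "BUSINESS PHONE"]),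
--                        ("TEMP", ["T", "TEMP", "TEMPORARY"])]:
--     for _a in _aliases:
--         _ALIAS_TO_TYPE[_a] = _cat
--
--
-- def validate_contact_type(type):
--     if not type:
--         raise ValueError(
--             "No contact type provided. A value in the allowed set must be provided.")
--     n_type = _ALIAS_TO_TYPE.get(str(type).upper().strip())
--     if n_type is None:
--         raise ValueError("Contact type was not in the allowed set of values.")
--     return n_type
-- ===== Notes on version B (the rewrite author's own statement) =====
-- stated objective: idiomatic
-- what changed: The category->frozenset dictionary and the per-category scanning loop are replaced by a single prebuilt inverted alias->category table consulted with one dict lookup.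
import Mathlib
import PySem

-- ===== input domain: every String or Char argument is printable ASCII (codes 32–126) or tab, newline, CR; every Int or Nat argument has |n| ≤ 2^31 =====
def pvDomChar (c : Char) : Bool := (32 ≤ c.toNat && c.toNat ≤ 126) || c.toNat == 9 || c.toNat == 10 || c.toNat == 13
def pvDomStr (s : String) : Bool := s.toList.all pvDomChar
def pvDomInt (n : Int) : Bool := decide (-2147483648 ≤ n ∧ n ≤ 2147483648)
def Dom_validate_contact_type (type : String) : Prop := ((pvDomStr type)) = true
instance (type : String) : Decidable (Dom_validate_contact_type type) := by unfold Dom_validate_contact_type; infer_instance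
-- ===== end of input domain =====

-- B replaces A's category→set dictionary and scanning loop by one prebuilt inverted alias→category table (idiomatic; return value only — both raise outside Pre_).

-- ===== PORT A =====
-- A's category → alias-set dictionary (frozensets ported as PySem.Set value lists)
def pvTypeDict : List (String × List String) :=
  [("HOME",   ["H", "HOME", "HOME PHONE", "HOUSE", "HOUSE PHONE", "LAND LINE"]),
   ("MOBILE", ["C", "CELL", "MOBILE", "M", "CELL PHONE", "MOBILE PHONE"]),
   ("WORK",   ["W", "WORK", "WORK PHONE", "B", "BUSINESS", "BUSINESS PHONE"]),
   ("TEMP",   ["T", "TEMP", "TEMPORARY"])]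

-- the part of A after the normalisation: the scanning loop over the dict keys
def pvScanA (t : String) : Option String :=
  pvTypeDict.foldl (fun n_type kv => if kv.2.contains t then some kv.1 else n_type) none

def validate_contact_type (type : String) : String :=
  if type = "" then ""            -- Python: raise ValueError (excluded by Pre_)
  else
    let t := PySem.Str.strip (PySem.Str.upper type)
    match pvScanA t with
    | none => ""                  -- Python: raise ValueError (excluded by Pre_)
    | some n_type => if n_type = "" then "" else n_type   -- 'if not n_type' re-check

-- ===== PORT B =====
-- B's inverted alias → category table, built once by the module-level loop
def pvAliasMap : PySem.Dict String String :=
  pvTypeDict.foldl (fun d kv => kv.2.foldl (fun d a => d.insert a kv.1) d) PySem.Dict.empty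

def validate_contact_type_alt (type : String) : String :=
  if type = "" then ""            -- Python: raise ValueError (excluded by Pre_)
  else
    match pvAliasMap.get? (PySem.Str.strip (PySem.Str.upper type)) with
    | none => ""                  -- Python: raise ValueError (excluded by Pre_)
    | some n_type => n_type

-- ===== PRECONDITION & SPEC =====
-- Pre_ excludes exactly the inputs on which A raises ValueError: the empty string
-- and strings whose normalisation is not one of the recognised aliases.
def Pre_validate_contact_type (type : String) : Prop :=
  type ≠ "" ∧
    (pvTypeDict.flatMap (·.2)).contains (PySem.Str.strip (PySem.Str.upper type)) = true
instance (type : String) : Decidable (Pre_validate_contact_type type) := by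
  unfold Pre_validate_contact_type; infer_instance
def pvWitness_validate_contact_type : String := " cell "
def Spec_validate_contact_type (type : String) (out : String) : Prop := out = validate_contact_type_alt type
instance (type : String) (out : String) : Decidable (Spec_validate_contact_type type out) := by unfold Spec_validate_contact_type; infer_instance

-- ===== CLAIM (what is proved, stated in full; the proofs are below) =====
def Claim_equal_validate_contact_type : Prop := ∀ (type : String), Dom_validate_contact_type type → Pre_validate_contact_type type → Spec_validate_contact_type type (validate_contact_type type)

-- ===== LEMMAS AND PROOFS =====

-- On every recognised alias, A's post-normalisation scan and B's table lookup agree.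
theorem pvScan_eq_lookup :
    ((pvTypeDict.flatMap (·.2)).all (fun t =>
      (match pvScanA t with
       | none => ""
       | some n_type => if n_type = "" then "" else n_type)
        == (match pvAliasMap.get? t with
            | none => ""
            | some n_type => n_type))) = true := by decide

-- ===== VERDICT (by name: the statement is the Claim_ definition above) =====
theorem validate_contact_type_spec : Claim_equal_validate_contact_type := by
  intro type _ hpre
  obtain ⟨hne, hmem⟩ := hpre
  unfold Spec_validate_contact_type validate_contact_type validate_contact_type_alt
  rw [if_neg hne, if_neg hne]
  have := List.all_eq_true.mp pvScan_eq_lookup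
        (PySem.Str.strip (PySem.Str.upper type))
        (by simpa using List.contains_iff_mem.mp hmem)
  exact eq_of_beq this
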